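-- pv_equiv track=rewrite | github.com/RuthlessCreature/LAOWANG | dailyReview.py | eval_theme_persistence
-- ===== SOURCE A (Python) =====
-- from typing import Dict, List, Optional, Sequence, Tuple
--
-- def _max_consecutive_flags(flags: Sequence[bool]) -> int:
--     best = 0
--     current = 0
--     for flag in flags:
--         if flag:
--             current += 1
--             if current > best:
--                 best = current
--         else:
--             current = 0
--     return best
--
-- def eval_theme_persistence(
--     theme: str,
--     daily_counts: Sequence[Dict[str, int]],
-- ) -> Tuple[int, str, str]:
--     if not daily_counts:
--         return 0, "非主线", "无数据"
--     top_flags: List[bool] = []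
--     top_days = 0
--     for counts in daily_counts:
--         if not counts:
--             top_flags.append(False)
--             continue
--         max_count = max(counts.values())
--         is_top = counts.get(theme, 0) > 0 and counts.get(theme, 0) == max_count
--         top_flags.append(is_top)
--         if is_top:
--             top_days += 1
--     max_consec = _max_consecutive_flags(top_flags)
--     if max_consec >= 2:
--         return 2, "强主线", f"{top_days}天领涨"
--     if top_days >= 2:
--         return 1, "弱主线", f"{top_days}天领涨"
--     if top_days == 1:
--         return 0, "一日游", "仅1天领涨"
--     return 0, "非主线", "未领涨"
-- ===== SOURCE B (Python) =====
-- def eval_theme_persistence(theme, daily_counts):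
--     if not daily_counts:
--         return 0, "非主线", "无数据"
--     top_idx = [i for i, counts in enumerate(daily_counts)
--                if counts.get(theme, 0) > 0
--                and all(v <= counts.get(theme, 0) for v in counts.values())]
--     top_days = len(top_idx)
--     if any(j - i == 1 for i, j in zip(top_idx, top_idx[1:])):
--         return 2, "强主线", f"{top_days}天领涨"
--     if top_days >= 2:
--         return 1, "弱主线", f"{top_days}天领涨"
--     if top_days == 1:
--         return 0, "一日游", "仅1天领涨"
--     return 0, "非主线", "未领涨"
-- ===== Notes on version B (the rewrite author's own statement) =====
-- stated objective: alternative
-- what changed: B drops A's flags-list + longest-consecutive-run helper entirely: it builds the list of indices of leading days with one comprehension and decides 'strong' by whether any two consecutive indices in that list differ by 1 (zip with its tail), so no run counters or best/current state exist; the per-day test uses all(v <= t) instead of max(values).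
import Mathlib
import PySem

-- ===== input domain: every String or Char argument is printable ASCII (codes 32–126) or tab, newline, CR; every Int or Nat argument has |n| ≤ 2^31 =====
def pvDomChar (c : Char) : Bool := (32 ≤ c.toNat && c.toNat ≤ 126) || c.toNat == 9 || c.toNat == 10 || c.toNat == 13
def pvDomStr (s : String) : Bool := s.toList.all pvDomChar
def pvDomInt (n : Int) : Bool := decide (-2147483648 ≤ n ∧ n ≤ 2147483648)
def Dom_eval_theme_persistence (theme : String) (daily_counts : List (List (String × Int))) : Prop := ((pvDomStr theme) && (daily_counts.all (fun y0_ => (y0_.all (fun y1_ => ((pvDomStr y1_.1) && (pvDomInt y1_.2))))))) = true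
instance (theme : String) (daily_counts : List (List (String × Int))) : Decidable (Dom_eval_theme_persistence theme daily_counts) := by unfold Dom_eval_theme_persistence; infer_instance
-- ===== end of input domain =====

-- B replaces A's flags list + longest-consecutive-run helper by one comprehension collecting the
-- indices of leading days and an adjacency test (any two consecutive indices differing by 1);
-- per-day test via all(v <= t) instead of max(values). Objective: alternative decomposition, same cost.

-- ===== PORT A =====
-- port of _max_consecutive_flags: fold over (best, current)
def maxConsecutiveFlags (flags : List Bool) : Int :=
  (flags.foldl (fun (bc : Int × Int) flag =>
    if flag then
      (if bc.2 + 1 > bc.1 then bc.2 + 1 else bc.1, bc.2 + 1)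
    else (bc.1, 0)) (0, 0)).1

def eval_theme_persistence (theme : String) (daily_counts : List (List (String × Int))) : Int × String × String :=
  if daily_counts = [] then (0, "非主线", "无数据")
  else
    let st := daily_counts.foldl (fun (st : List Bool × Int) counts =>
      let d := PySem.Dict.ofList counts
      if d.size = 0 then (st.1 ++ [false], st.2)
      else
        -- max(counts.values()): guarded by the nonempty branch, max? is always some here
        let max_count := (PySem.List.max? d.values (fun x => x)).getD 0
        let is_top := decide (0 < d.getD theme 0) && decide (d.getD theme 0 = max_count)
        (st.1 ++ [is_top], if is_top then st.2 + 1 else st.2)) ([], 0)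
    let max_consec := maxConsecutiveFlags st.1
    if max_consec ≥ 2 then (2, "强主线", PySem.Int.toStr st.2 ++ "天领涨")
    else if st.2 ≥ 2 then (1, "弱主线", PySem.Int.toStr st.2 ++ "天领涨")
    else if st.2 = 1 then (0, "一日游", "仅1天领涨")
    else (0, "非主线", "未领涨")

-- ===== PORT B =====
def eval_theme_persistence_alt (theme : String) (daily_counts : List (List (String × Int))) : Int × String × String :=
  if daily_counts = [] then (0, "非主线", "无数据")
  else
    let top_idx := ((PySem.List.enumerate daily_counts 0).filter (fun p =>
        let d := PySem.Dict.ofList p.2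
        decide (0 < d.getD theme 0) && d.values.all (fun v => decide (v ≤ d.getD theme 0)))).map (fun p => p.1)
    let top_days : Int := (top_idx.length : Int)
    if (top_idx.zip (PySem.List.slice top_idx (some 1) none)).any (fun p => decide (p.2 - p.1 = 1)) then
      (2, "强主线", PySem.Int.toStr top_days ++ "天领涨")
    else if top_days ≥ 2 then (1, "弱主线", PySem.Int.toStr top_days ++ "天领涨")
    else if top_days = 1 then (0, "一日游", "仅1天领涨")
    else (0, "非主线", "未领涨")

-- ===== PRECONDITION & SPEC =====
def Spec_eval_theme_persistence (theme : String) (daily_counts : List (List (String × Int))) (out : Int × String × String) : Prop := out = eval_theme_persistence_alt theme daily_counts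
instance (theme : String) (daily_counts : List (List (String × Int))) (out : Int × String × String) : Decidable (Spec_eval_theme_persistence theme daily_counts out) := by unfold Spec_eval_theme_persistence; infer_instance

-- ===== CLAIM =====
def Claim_equal_eval_theme_persistence : Prop := ∀ (theme : String) (daily_counts : List (List (String × Int))), Dom_eval_theme_persistence theme daily_counts → Spec_eval_theme_persistence theme daily_counts (eval_theme_persistence theme daily_counts)

-- ===== LEMMAS AND PROOFS =====

-- the per-day "is_top" decision, as B computes it
def dayFlag (theme : String) (counts : List (String × Int)) : Bool :=
  let d := PySem.Dict.ofList counts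
  decide (0 < d.getD theme 0) && d.values.all (fun v => decide (v ≤ d.getD theme 0))

-- _max_consecutive_flags' loop body on (best, current)
def mstep (bc : Int × Int) (flag : Bool) : Int × Int :=
  if flag then (if bc.2 + 1 > bc.1 then bc.2 + 1 else bc.1, bc.2 + 1) else (bc.1, 0)

-- "some two adjacent flags are both true"
def adj : List Bool → Bool
  | [] => false
  | a :: t => (a && t.head?.getD false) || adj t

-- the index list B builds, abstracted over the flags
def idxs (n : Int) : List Bool → List Int
  | [] => []
  | b :: t => if b then n :: idxs (n + 1) t else idxs (n + 1) t

theorem flag_of_empty (theme : String) (counts : List (String × Int))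
    (h : (PySem.Dict.ofList counts).size = 0) : dayFlag theme counts = false := by
  have hitems : (PySem.Dict.ofList counts).items = [] := by
    simpa [PySem.Dict.size] using h
  have hnone : (PySem.Dict.ofList counts).get? theme = none :=
    (PySem.Dict.get?_eq_none_iff_not_mem_keys _ _).mpr (by simp [PySem.Dict.keys, hitems])
  unfold dayFlag
  simp [PySem.Dict.getD_eq_get?_getD, hnone]

theorem flag_of_nonempty (theme : String) (counts : List (String × Int))
    (_h : ¬ (PySem.Dict.ofList counts).size = 0) :
    (decide (0 < (PySem.Dict.ofList counts).getD theme 0) &&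
      decide ((PySem.Dict.ofList counts).getD theme 0 =
        (PySem.List.max? (PySem.Dict.ofList counts).values (fun x => x)).getD 0)) =
    dayFlag theme counts := by
  unfold dayFlag
  show (decide (0 < (PySem.Dict.ofList counts).getD theme 0) &&
      decide ((PySem.Dict.ofList counts).getD theme 0 =
        (PySem.List.max? (PySem.Dict.ofList counts).values (fun x => x)).getD 0))
    = (decide (0 < (PySem.Dict.ofList counts).getD theme 0) &&
        (PySem.Dict.ofList counts).values.all
          (fun v => decide (v ≤ (PySem.Dict.ofList counts).getD theme 0)))
  by_cases h0 : 0 < (PySem.Dict.ofList counts).getD theme 0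
  · have hget : (PySem.Dict.ofList counts).get? theme =
        some ((PySem.Dict.ofList counts).getD theme 0) := by
      rcases hg : (PySem.Dict.ofList counts).get? theme with _ | v
      · exfalso
        have : (PySem.Dict.ofList counts).getD theme 0 = 0 := by
          rw [PySem.Dict.getD_eq_get?_getD, hg]; rfl
        omega
      · rw [PySem.Dict.getD_eq_get?_getD, hg]; rfl
    have htv : (PySem.Dict.ofList counts).getD theme 0 ∈ (PySem.Dict.ofList counts).values := by
      have := PySem.Dict.mem_items_of_get?_eq_some (PySem.Dict.ofList counts) hget
      simp only [PySem.Dict.values, List.mem_map]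
      exact ⟨(theme, (PySem.Dict.ofList counts).getD theme 0), this, rfl⟩
    have hvne : (PySem.Dict.ofList counts).values ≠ [] := by
      intro hv; rw [hv] at htv; exact absurd htv (List.not_mem_nil)
    rcases hm : PySem.List.max? (PySem.Dict.ofList counts).values (fun x => x) with _ | m
    · exact absurd ((PySem.List.max?_eq_none_iff _ _).mp hm) hvne
    have hmmem : m ∈ (PySem.Dict.ofList counts).values := PySem.List.max?_mem hm
    have hmax : ∀ y ∈ (PySem.Dict.ofList counts).values, y ≤ m := PySem.List.max?_isMax hm
    rw [Option.getD_some]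
    have hb : decide ((PySem.Dict.ofList counts).getD theme 0 = m)
        = (PySem.Dict.ofList counts).values.all
            (fun v => decide (v ≤ (PySem.Dict.ofList counts).getD theme 0)) := by
      rw [Bool.eq_iff_iff]
      simp only [decide_eq_true_eq, List.all_eq_true, decide_eq_true_eq]
      constructor
      · intro he v hv; rw [he]; exact hmax v hv
      · intro hall; exact le_antisymm (hmax _ htv) (hall m hmmem)
    rw [hb]
  · simp [h0]

-- A's per-day loop body equals the simple flag-appending step
theorem astep_eq (theme : String) :
    (fun (st : List Bool × Int) counts =>
      let d := PySem.Dict.ofList counts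
      if d.size = 0 then (st.1 ++ [false], st.2)
      else
        let max_count := (PySem.List.max? d.values (fun x => x)).getD 0
        let is_top := decide (0 < d.getD theme 0) && decide (d.getD theme 0 = max_count)
        (st.1 ++ [is_top], if is_top then st.2 + 1 else st.2))
    = (fun (st : List Bool × Int) counts =>
        (st.1 ++ [dayFlag theme counts],
         if dayFlag theme counts then st.2 + 1 else st.2)) := by
  funext st counts
  by_cases hsz : (PySem.Dict.ofList counts).size = 0
  · simp [hsz, flag_of_empty theme counts hsz]
  · simp only [if_neg hsz, flag_of_nonempty theme counts hsz]

-- A's day loop produces exactly the flags list and the count of true flags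
theorem a_fold (theme : String) :
    ∀ (dcs : List (List (String × Int))) (fs : List Bool) (t : Int),
    dcs.foldl (fun (st : List Bool × Int) counts =>
      let d := PySem.Dict.ofList counts
      if d.size = 0 then (st.1 ++ [false], st.2)
      else
        let max_count := (PySem.List.max? d.values (fun x => x)).getD 0
        let is_top := decide (0 < d.getD theme 0) && decide (d.getD theme 0 = max_count)
        (st.1 ++ [is_top], if is_top then st.2 + 1 else st.2)) (fs, t)
    = (fs ++ dcs.map (dayFlag theme),
       t + (((dcs.map (dayFlag theme)).countP id : Nat) : Int)) := by
  intro dcs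
  rw [astep_eq theme]
  induction dcs with
  | nil => intro fs t; simp
  | cons c rest ih =>
    intro fs t
    simp only [List.foldl_cons]
    rw [ih]
    rcases hb : dayFlag theme c with _ | _
    · simp [hb, List.append_assoc]
    · simp [hb, List.append_assoc]
      ring

-- _max_consecutive_flags reaches 2 exactly when two adjacent flags are true
theorem mconsec : ∀ (bs : List Bool) (best cur : Int), 0 ≤ best → 0 ≤ cur →
    (2 ≤ (bs.foldl mstep (best, cur)).1 ↔
      (2 ≤ best ∨ (1 ≤ cur ∧ bs.head?.getD false = true) ∨ adj bs = true)) := by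
  intro bs
  induction bs with
  | nil => intro best cur _ _; simp [adj]
  | cons b t ih =>
    intro best cur hb hc
    rcases b with _ | _
    · simp only [List.foldl_cons, mstep, Bool.false_eq_true, if_false]
      rw [ih best 0 hb le_rfl]
      simp only [adj, List.head?_cons, Option.getD_some, Bool.false_eq_true,
        Bool.false_and, Bool.false_or]
      constructor
      · rintro (h | ⟨h1, _⟩ | h)
        · exact Or.inl h
        · omega
        · exact Or.inr (Or.inr h)
      · rintro (h | ⟨_, h⟩ | h)
        · exact Or.inl h
        · simp at h
        · exact Or.inr (Or.inr h)
    · simp only [List.foldl_cons, mstep, if_true]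
      rw [ih _ _ (by split_ifs <;> omega) (by omega)]
      simp only [adj, List.head?_cons, Option.getD_some, Bool.true_and,
        Bool.or_eq_true]
      rcases hh : t.head?.getD false with _ | _ <;> rcases ha : adj t with _ | _ <;>
        simp <;> split_ifs with h <;> omega

theorem idxs_ge : ∀ (bs : List Bool) (n m : Int), m ∈ idxs n bs → n ≤ m := by
  intro bs
  induction bs with
  | nil => intro n m h; simp [idxs] at h
  | cons b t ih =>
    intro n m h
    rcases b with _ | _
    · simp only [idxs, Bool.false_eq_true, if_false] at h
      have := ih (n + 1) m h; omega
    · simp only [idxs, if_true, List.mem_cons] at h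
      rcases h with h | h
      · omega
      · have := ih (n + 1) m h; omega

theorem idxs_length : ∀ (bs : List Bool) (n : Int), (idxs n bs).length = bs.countP id := by
  intro bs
  induction bs with
  | nil => intro n; simp [idxs]
  | cons b t ih =>
    intro n
    rcases b with _ | _ <;>
      simp [idxs, ih]

-- B's comprehension computes idxs over the flags
theorem filt_eq (theme : String) :
    ∀ (dcs : List (List (String × Int))) (n : Int),
    ((PySem.List.enumerate dcs n).filter (fun p => dayFlag theme p.2)).map (fun p => p.1)
      = idxs n (dcs.map (dayFlag theme)) := by
  intro dcs
  induction dcs with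
  | nil => intro n; simp [idxs, PySem.List.enumerate_nil]
  | cons c rest ih =>
    intro n
    rw [PySem.List.enumerate_cons]
    rcases hb : dayFlag theme c with _ | _ <;>
      simp [hb, idxs, ih]

-- skipping the head of the index list when no later index can be n + 1
theorem zip_head_skip (L : List Int) (n : Int) (h : ∀ m ∈ L, ¬ (m - n = 1)) :
    ((n :: L).zip (n :: L).tail).any (fun p => decide (p.2 - p.1 = 1))
      = (L.zip L.tail).any (fun p => decide (p.2 - p.1 = 1)) := by
  cases L with
  | nil => simp
  | cons x xs =>
    have hx : ¬ (x - n = 1) := h x List.mem_cons_self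
    simp [hx]

-- B's adjacency test over the index list equals adj over the flags
theorem adj_idxs : ∀ (bs : List Bool) (n : Int),
    ((idxs n bs).zip (idxs n bs).tail).any (fun p => decide (p.2 - p.1 = 1)) = adj bs := by
  intro bs
  induction bs with
  | nil => intro n; simp [idxs, adj]
  | cons b t ih =>
    intro n
    rcases b with _ | _
    · simpa [idxs, adj] using ih (n + 1)
    · rw [show idxs n (true :: t) = n :: idxs (n + 1) t from rfl]
      rcases t with _ | ⟨b', t'⟩
      · simp [idxs, adj]
      · rcases b' with _ | _
        · -- next flag false: every later index is at least n + 2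
          have hb : ∀ m ∈ idxs (n + 1) (false :: t'), ¬ (m - n = 1) := by
            intro m hm
            have hm' : m ∈ idxs (n + 1 + 1) t' := hm
            have := idxs_ge _ _ _ hm'
            omega
          rw [zip_head_skip _ n hb, ih (n + 1)]
          simp [adj]
        · -- next flag true: indices n and n + 1 are adjacent
          simp [idxs, adj]

-- ===== VERDICT =====
theorem eval_theme_persistence_spec : Claim_equal_eval_theme_persistence := by
  intro theme dcs _
  unfold Spec_eval_theme_persistence eval_theme_persistence eval_theme_persistence_alt
  by_cases hnil : dcs = []
  · simp [hnil]
  · simp only [if_neg hnil]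
    rw [a_fold theme dcs [] 0]
    have hpred : (fun (p : Int × List (String × Int)) =>
        let d := PySem.Dict.ofList p.2
        decide (0 < d.getD theme 0) && d.values.all (fun v => decide (v ≤ d.getD theme 0)))
      = (fun p => dayFlag theme p.2) := rfl
    rw [hpred, PySem.List.slice_from_one, filt_eq theme dcs 0, adj_idxs _ 0,
      idxs_length _ 0]
    simp only [List.nil_append, zero_add]
    have hmc : maxConsecutiveFlags (dcs.map (dayFlag theme))
        = ((dcs.map (dayFlag theme)).foldl mstep (0, 0)).1 := rfl
    rw [hmc]
    have hm := mconsec (dcs.map (dayFlag theme)) 0 0 le_rfl le_rfl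
    by_cases hadj : adj (dcs.map (dayFlag theme)) = true
    · rw [if_pos (show ((dcs.map (dayFlag theme)).foldl mstep (0, 0)).1 ≥ 2 from
        hm.mpr (Or.inr (Or.inr hadj))), if_pos hadj]
    · have hlt : ¬ ((dcs.map (dayFlag theme)).foldl mstep (0, 0)).1 ≥ 2 := by
        intro h
        rcases hm.mp h with h2 | ⟨h1, _⟩ | ha
        · omega
        · omega
        · exact hadj ha
      rw [if_neg hlt, if_neg hadj]
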